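-- pv_equiv track=rewrite | github.com/pobugi/leetcode | 1-1000/930_binary_subarrays_with_sum/solution.py | solve
-- ===== SOURCE A (Python) =====
-- def solve(nums: list[int], goal: int):
--     count = {0: 1}
--     cumulative_sum = 0
--     result = 0
--     for num in nums:
--         cumulative_sum += num
--         if cumulative_sum - goal in count:
--             result += count[cumulative_sum - goal]
--         count[cumulative_sum] = count.get(cumulative_sum, 0) + 1
--     return result
-- ===== SOURCE B (Python) =====
-- def solve(nums: list[int], goal: int):
--     result = 0
--     suffix = nums
--     while suffix:
--         s = 0
--         for x in suffix:
--             s += x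
--             if s == goal:
--                 result += 1
--         suffix = suffix[1:]
--     return result
-- ===== Notes on version B (the rewrite author's own statement) =====
-- stated objective: alternative
-- what changed: Replaces the single-pass prefix-sum hashmap with a direct nested scan: for every suffix start, walk forward with a running sum and count each time it hits goal; no auxiliary dict is kept.
import Mathlib
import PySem

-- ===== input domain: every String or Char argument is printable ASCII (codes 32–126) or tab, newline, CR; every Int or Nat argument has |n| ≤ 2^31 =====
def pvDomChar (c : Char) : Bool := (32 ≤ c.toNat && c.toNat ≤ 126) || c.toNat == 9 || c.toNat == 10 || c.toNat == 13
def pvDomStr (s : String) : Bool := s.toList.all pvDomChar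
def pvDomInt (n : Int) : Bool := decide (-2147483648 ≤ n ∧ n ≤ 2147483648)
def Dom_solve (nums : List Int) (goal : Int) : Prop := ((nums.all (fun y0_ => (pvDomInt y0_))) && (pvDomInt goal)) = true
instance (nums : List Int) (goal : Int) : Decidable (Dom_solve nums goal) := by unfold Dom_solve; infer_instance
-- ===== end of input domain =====

-- B replaces A's prefix-sum hashmap single pass with a nested suffix scan (no dict); objective: alternative (not faster).

-- ===== PORT A =====
-- literal transliteration of A: dict of prefix-sum counts, one pass
def solve (nums : List Int) (goal : Int) : Int :=
  (nums.foldl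
    (fun (st : PySem.Dict Int Int × Int × Int) num =>
      let count := st.1
      let cumulative_sum := st.2.1 + num
      let result :=
        if count.contains (cumulative_sum - goal) then
          st.2.2 + count.getD (cumulative_sum - goal) 0
        else st.2.2
      (count.insert cumulative_sum (count.getD cumulative_sum 0 + 1), cumulative_sum, result))
    (PySem.Dict.ofList [((0 : Int), (1 : Int))], 0, 0)).2.2

-- ===== PORT B =====
-- inner `for x in suffix` loop of Source B: running sum s, bump result when s == goal
def solveAltInner (goal : Int) (suffix : List Int) (result : Int) : Int :=
  (suffix.foldl
    (fun (p : Int × Int) x =>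
      let s := p.1 + x
      (s, if s = goal then p.2 + 1 else p.2))
    (0, result)).2

-- outer `while suffix` loop of Source B: scan each suffix, then drop its head
def solveAltGo (goal : Int) (result : Int) : List Int → Int
  | [] => result
  | x :: rest => solveAltGo goal (solveAltInner goal (x :: rest) result) rest

def solve_alt (nums : List Int) (goal : Int) : Int := solveAltGo goal 0 nums

-- ===== PRECONDITION & SPEC =====
def Spec_solve (nums : List Int) (goal : Int) (out : Int) : Prop := out = solve_alt nums goal
instance (nums : List Int) (goal : Int) (out : Int) : Decidable (Spec_solve nums goal out) := by unfold Spec_solve; infer_instance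

-- ===== CLAIM (what is proved, stated in full; the proofs are below) =====
def Claim_equal_solve : Prop := ∀ (nums : List Int) (goal : Int), Dom_solve nums goal → Spec_solve nums goal (solve nums goal)

-- ===== LEMMAS AND PROOFS =====

-- number of nonempty prefixes p of l with s + sum p = goal
def npc (goal s : Int) : List Int → Int
  | [] => 0
  | x :: xs => (if s + x = goal then 1 else 0) + npc goal (s + x) xs

-- total count of subarrays of l summing to goal
def Ftot (goal : Int) : List Int → Int
  | [] => 0
  | x :: xs => npc goal 0 (x :: xs) + Ftot goal xs

-- subarrays starting strictly after position 0
def Fsh (goal : Int) : List Int → Int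
  | [] => 0
  | _ :: xs => Ftot goal xs

theorem Ftot_eq (goal : Int) (l : List Int) : Ftot goal l = npc goal 0 l + Fsh goal l := by
  cases l <;> simp [Ftot, Fsh, npc]

theorem solveAltInner_eq (goal : Int) (l : List Int) :
    ∀ (s result : Int),
      (l.foldl (fun (p : Int × Int) x =>
        let s := p.1 + x
        (s, if s = goal then p.2 + 1 else p.2)) (s, result)).2 = result + npc goal s l := by
  induction l with
  | nil => intro s result; simp [npc]
  | cons x xs ih =>
    intro s result
    simp only [List.foldl_cons, npc]
    rw [ih]
    split_ifs <;> ring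

theorem solveAltGo_eq (goal : Int) (l : List Int) : ∀ result : Int,
    solveAltGo goal result l = result + Ftot goal l := by
  induction l with
  | nil => intro result; simp [solveAltGo, Ftot]
  | cons x xs ih =>
    intro result
    simp only [solveAltGo, Ftot]
    rw [ih, solveAltInner, solveAltInner_eq]
    ring

theorem sum_map_indicator (k : Int) (S : List Int) :
    (S.map (fun s => if s = k then (1 : Int) else 0)).sum = (S.count k : Int) := by
  induction S with
  | nil => simp
  | cons a S ih =>
    simp only [List.map_cons, List.sum_cons, List.count_cons, ih]
    by_cases h : a = k
    · simp [h]; ring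
    · have hba : (a == k) = false := by simp; omega
      simp [h, hba]

theorem sum_map_add_int (f g : Int → Int) (S : List Int) :
    (S.map (fun s => f s + g s)).sum = (S.map f).sum + (S.map g).sum := by
  induction S with
  | nil => simp
  | cons a S ih => simp [ih]; ring

-- main invariant for A's fold: the dict counts exactly the stored prefix sums S
theorem loopA_eq (goal : Int) (nums : List Int) :
    ∀ (d : PySem.Dict Int Int) (S : List Int) (cum res : Int),
      (∀ v, d.getD v 0 = (S.count v : Int)) →
      (nums.foldl
        (fun (st : PySem.Dict Int Int × Int × Int) num =>
          let count := st.1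
          let cumulative_sum := st.2.1 + num
          let result :=
            if count.contains (cumulative_sum - goal) then
              st.2.2 + count.getD (cumulative_sum - goal) 0
            else st.2.2
          (count.insert cumulative_sum (count.getD cumulative_sum 0 + 1), cumulative_sum, result))
        (d, cum, res)).2.2
      = res + (S.map (fun s => npc goal (cum - s) nums)).sum + Fsh goal nums := by
  induction nums with
  | nil =>
    intro d S cum res hinv
    simp [npc, Fsh]
  | cons x xs ih =>
    intro d S cum res hinv
    simp only [List.foldl_cons]
    -- res after this step equals res + count of (cum+x-goal) in S
    have hres : (if d.contains (cum + x - goal) then res + d.getD (cum + x - goal) 0 else res)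
        = res + (S.count (cum + x - goal) : Int) := by
      by_cases hc : d.contains (cum + x - goal)
      · simp [hc, hinv]
      · have h0 : d.getD (cum + x - goal) 0 = 0 :=
          PySem.Dict.getD_of_not_contains d 0 (by simpa using hc)
        have := hinv (cum + x - goal)
        rw [h0] at this
        simp [hc, ← this]
    have hinv' : ∀ v, (d.insert (cum + x) (d.getD (cum + x) 0 + 1)).getD v 0
        = (((cum + x) :: S).count v : Int) := by
      intro v
      rw [PySem.Dict.getD_insert]
      by_cases hv : v = cum + x
      · simp [hv, hinv]
      · have : (cum + x == v) = false := by simp; omega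
        simp [hv, hinv, List.count_cons, this]
    rw [ih _ (((cum + x) :: S)) (cum + x) _ hinv', hres]
    simp only [List.map_cons, List.sum_cons, sub_self]
    have hfsh : Fsh goal (x :: xs) = npc goal 0 xs + Fsh goal xs := by
      rw [show Fsh goal (x :: xs) = Ftot goal xs from rfl, Ftot_eq]
    have hnpc : (S.map (fun s => npc goal (cum - s) (x :: xs))).sum
        = (S.count (cum + x - goal) : Int) + (S.map (fun s => npc goal (cum + x - s) xs)).sum := by
      have hpt : (S.map (fun s => npc goal (cum - s) (x :: xs)))
          = S.map (fun s => (if s = cum + x - goal then (1 : Int) else 0) + npc goal (cum + x - s) xs) := by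
        apply List.map_congr_left
        intro s _
        simp only [npc]
        have h1 : cum - s + x = cum + x - s := by ring
        have h2 : (cum - s + x = goal) ↔ (s = cum + x - goal) := by omega
        rw [h1]
        split_ifs with a b b <;> first | rfl | (exfalso; omega)
      rw [hpt, sum_map_add_int, sum_map_indicator]
    rw [hnpc, hfsh]
    ring

-- ===== VERDICT (by name: the statement is the Claim_ definition above) =====
theorem solve_spec : Claim_equal_solve := by
  intro nums goal _
  show solve nums goal = solve_alt nums goal
  unfold solve solve_alt
  have hmk : PySem.Dict.ofList [((0 : Int), (1 : Int))] = PySem.Dict.mk [((0 : Int), (1 : Int))] := by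
    decide
  have hinv : ∀ v, (PySem.Dict.ofList [((0 : Int), (1 : Int))]).getD v 0
      = (([(0 : Int)].count v : Nat) : Int) := by
    intro v
    rw [hmk, PySem.Dict.getD_eq_get?_getD, PySem.Dict.get?_mk_cons]
    by_cases hv : v = 0
    · subst hv; simp
    · have hv0 : ((0 : Int) == v) = false := by simp; omega
      simp [hv0, PySem.Dict.get?, List.count_singleton]
  rw [loopA_eq goal nums _ [(0 : Int)] 0 0 hinv, solveAltGo_eq, Ftot_eq]
  simp
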